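-- pv_equiv track=rewrite | github.com/DaryaTrifonova/trifonova-221-332-web-dev | trifonova-221-332-web-dev-laborate_2/app/app.py | format_validate
-- ===== SOURCE A (Python) =====
-- def format_validate(number):
--     allowed_chars = ' ()-.+0123456789'
--
--     for i in number:
--         if i not in allowed_chars:
--             return None, 'Недопустимый ввод. В номере телефона встречаются недопустимые символы.'
--
--     sim = ''
--     for i in number:
--         if i.isdigit():
--             sim += i
--
--     if len(sim) not in (10, 11):
--         return None, 'Недопустимый ввод. Неверное количество цифр.'
--
--     if len(sim) == 11 and sim.startswith('7'):
--         sim = '8' + sim[1:]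
--
--     if len(sim) == 10:
--         sim = '8' + sim
--
--     formatted_number = ''
--
--     if sim.startswith('+7'):
--         formatted_number = '8-{}-{}-{}-{}'.format(sim[2:5], sim[5:8], sim[8:10], sim[10:])
--
--     elif sim.startswith('8'):
--         formatted_number = '8-{}-{}-{}-{}'.format(sim[1:4], sim[4:7], sim[7:9], sim[9:])
--     else:
--         return None, 'Недопустимый ввод. Неверный код страны или номера.'
--
--     return formatted_number, None
-- ===== SOURCE B (Python) =====
-- def format_validate(number):
--     digits = []
--     for ch in number:
--         if '0' <= ch <= '9':
--             digits.append(ch)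
--         elif ch not in ' ()-.+':
--             return None, 'Недопустимый ввод. В номере телефона встречаются недопустимые символы.'
--     n = len(digits)
--     if n != 10 and n != 11:
--         return None, 'Недопустимый ввод. Неверное количество цифр.'
--     if n == 11 and digits[0] != '7' and digits[0] != '8':
--         return None, 'Недопустимый ввод. Неверный код страны или номера.'
--     local = digits[-10:]
--     return '8-{}-{}-{}-{}'.format(''.join(local[:3]), ''.join(local[3:6]),
--                                   ''.join(local[6:8]), ''.join(local[8:])), None
-- ===== Notes on version B (the rewrite author's own statement) =====
-- stated objective: simpler
-- what changed: One pass that simultaneously validates characters and collects digits (instead of two separate scans), then a single direct check (11 digits must start with digit 7 or 8) and one 3-3-2-2 format of the last ten digits, replacing A's multi-branch country-code normalization chain whose plus-seven branch is dead code.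
import Mathlib
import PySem

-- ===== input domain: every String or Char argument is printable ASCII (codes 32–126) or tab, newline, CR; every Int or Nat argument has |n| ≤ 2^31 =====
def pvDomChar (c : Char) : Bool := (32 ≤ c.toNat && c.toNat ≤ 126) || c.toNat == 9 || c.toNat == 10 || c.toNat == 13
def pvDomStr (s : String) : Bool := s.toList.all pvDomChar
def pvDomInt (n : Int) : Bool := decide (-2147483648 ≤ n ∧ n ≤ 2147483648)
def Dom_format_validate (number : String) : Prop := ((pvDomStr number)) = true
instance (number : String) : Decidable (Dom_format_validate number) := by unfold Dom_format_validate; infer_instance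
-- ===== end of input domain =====

-- B replaces A's two scans and its country-code normalization chain (which has a dead plus-seven branch) by one
-- validate-and-collect pass over the characters plus a single 3-3-2-2 format of the last ten digits; objective: simpler.


def pvErrChars : String := "Недопустимый ввод. В номере телефона встречаются недопустимые символы."
def pvErrLen : String := "Недопустимый ввод. Неверное количество цифр."
def pvErrCode : String := "Недопустимый ввод. Неверный код страны или номера."

-- ===== PORT A =====
def pvAllowedA : List Char := " ()-.+0123456789".toList

def format_validate (number : String) : Option String × Option String :=
  let cs := number.toList
  if cs.any (fun c => !(pvAllowedA.contains c)) then (none, some pvErrChars)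
  else
    let sim := cs.foldl (fun acc c => if PySem.Chars.isdigit c then acc ++ [c] else acc) ([] : List Char)
    if ¬ (sim.length = 10 ∨ sim.length = 11) then (none, some pvErrLen)
    else
      let sim2 := if sim.length = 11 ∧ PySem.Chars.startswith sim ['7'] then '8' :: PySem.List.slice sim (some 1) none else sim
      let sim3 := if sim2.length = 10 then '8' :: sim2 else sim2
      if PySem.Chars.startswith sim3 ['+', '7'] then
        (some (String.mk ('8' :: '-' :: PySem.List.slice sim3 (some 2) (some 5) ++ '-' :: PySem.List.slice sim3 (some 5) (some 8) ++ '-' :: PySem.List.slice sim3 (some 8) (some 10) ++ '-' :: PySem.List.slice sim3 (some 10) none)), none)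
      else if PySem.Chars.startswith sim3 ['8'] then
        (some (String.mk ('8' :: '-' :: PySem.List.slice sim3 (some 1) (some 4) ++ '-' :: PySem.List.slice sim3 (some 4) (some 7) ++ '-' :: PySem.List.slice sim3 (some 7) (some 9) ++ '-' :: PySem.List.slice sim3 (some 9) none)), none)
      else (none, some pvErrCode)

-- ===== PORT B =====
def pvPunct : List Char := " ()-.+".toList

-- one pass: collect ASCII digits, reject on the first character that is neither a digit nor punctuation
def pvCollect (acc : List Char) : List Char → Option (List Char)
  | [] => some acc
  | c :: rest =>
    if '0' ≤ c ∧ c ≤ '9' then pvCollect (acc ++ [c]) rest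
    else if pvPunct.contains c then pvCollect acc rest
    else none

def format_validate_alt (number : String) : Option String × Option String :=
  match pvCollect [] number.toList with
  | none => (none, some pvErrChars)
  | some ds =>
    if ds.length ≠ 10 ∧ ds.length ≠ 11 then (none, some pvErrLen)
    -- digits[0] is safe in Source B (ds has length 11 here); headD mirrors it exactly
    else if ds.length = 11 ∧ ds.headD ' ' ≠ '7' ∧ ds.headD ' ' ≠ '8' then (none, some pvErrCode)
    else
      let loc := PySem.List.slice ds (some (-10)) none
      (some (String.mk ('8' :: '-' :: PySem.List.slice loc none (some 3) ++ '-' :: PySem.List.slice loc (some 3) (some 6) ++ '-' :: PySem.List.slice loc (some 6) (some 8) ++ '-' :: PySem.List.slice loc (some 8) none)), none)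

-- ===== PRECONDITION & SPEC =====
def Spec_format_validate (number : String) (out : Option String × Option String) : Prop := out = format_validate_alt number
instance (number : String) (out : Option String × Option String) : Decidable (Spec_format_validate number out) := by unfold Spec_format_validate; infer_instance

-- ===== CLAIM (what is proved, stated in full; the proofs are below) =====
def Claim_equal_format_validate : Prop := ∀ (number : String), Dom_format_validate number → Spec_format_validate number (format_validate number)

-- ===== LEMMAS AND PROOFS =====

-- per-character facts on the ASCII domain
theorem pv_char_facts (c : Char) (h : pvDomChar c = true) :
    (pvAllowedA.contains c = (decide ('0' ≤ c ∧ c ≤ '9') || pvPunct.contains c))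
    ∧ PySem.Chars.isdigit c = decide ('0' ≤ c ∧ c ≤ '9') := by
  simp only [pvDomChar, Bool.or_eq_true, Bool.and_eq_true, decide_eq_true_eq, beq_iff_eq] at h
  obtain ⟨n, hn, hb⟩ : ∃ n, c = Char.ofNat n ∧ ((32 ≤ n ∧ n ≤ 126) ∨ n = 9 ∨ n = 10 ∨ n = 13) := by
    refine ⟨c.toNat, (Char.ofNat_toNat c).symm, by tauto⟩
  subst hn
  rcases hb with ⟨h4, h5⟩ | rfl | rfl | rfl
  · interval_cases n <;> decide
  all_goals decide

theorem pv_collect_eq (cs : List Char) (acc : List Char) (h : ∀ c ∈ cs, pvDomChar c = true) :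
    pvCollect acc cs =
      if cs.all (fun c => pvAllowedA.contains c) then
        some (acc ++ cs.filter (fun c => decide ('0' ≤ c ∧ c ≤ '9')))
      else none := by
  induction cs generalizing acc with
  | nil => simp [pvCollect]
  | cons c rest ih =>
    have hc := pv_char_facts c (h c (by simp))
    have hmem : (c ∈ pvAllowedA) ↔ (('0' ≤ c ∧ c ≤ '9') ∨ c ∈ pvPunct) := by
      have h1 := hc.1
      simp only [List.contains_eq_mem] at h1
      have h2 : (decide (c ∈ pvAllowedA) = true)
          ↔ ((decide ('0' ≤ c ∧ c ≤ '9') || decide (c ∈ pvPunct)) = true) := by rw [h1]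
      simpa using h2
    have hrest : ∀ x ∈ rest, pvDomChar x = true := fun x hx => h x (by simp [hx])
    by_cases hd : '0' ≤ c ∧ c ≤ '9'
    · simp [pvCollect, hd, ih _ hrest, hmem.mpr (Or.inl hd)]
    · by_cases hp : c ∈ pvPunct
      · simp [pvCollect, hd, hp, ih _ hrest, hmem.mpr (Or.inr hp)]
      · have hA : c ∉ pvAllowedA := fun hx => by rcases hmem.mp hx with h' | h' <;> [exact hd h'; exact hp h']
        simp [pvCollect, hd, hp, hA]

theorem pv_fold_filter (p : Char → Bool) (cs : List Char) :
    cs.foldl (fun acc c => if p c then acc ++ [c] else acc) ([] : List Char) = cs.filter p := by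
  simpa using PySem.List.foldl_append_if p id cs []

-- the A-side tail formatting of '8' :: local equals the B-side formatting of local (10 digits)
theorem pv_slices_eq (ds : List Char) (h : ds.length = 10) :
    PySem.List.slice ('8'::ds) (some 1) (some 4) = PySem.List.slice ds none (some 3)
    ∧ PySem.List.slice ('8'::ds) (some 4) (some 7) = PySem.List.slice ds (some 3) (some 6)
    ∧ PySem.List.slice ('8'::ds) (some 7) (some 9) = PySem.List.slice ds (some 6) (some 8)
    ∧ PySem.List.slice ('8'::ds) (some 9) none = PySem.List.slice ds (some 8) none := by
  refine ⟨?_, ?_, ?_, ?_⟩ <;> simp [PySem.List.slice, h]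

theorem format_validate_spec : Claim_equal_format_validate := by
  intro number hDom
  unfold Spec_format_validate format_validate format_validate_alt
  have hall : ∀ c ∈ number.toList, pvDomChar c = true := by
    simpa [Dom_format_validate, pvDomStr, List.all_eq_true] using hDom
  rw [pv_collect_eq _ [] hall]
  simp only [pv_fold_filter]
  by_cases hbad : (number.toList.any fun c => !(pvAllowedA.contains c)) = true
  · have hex : ∃ x ∈ number.toList, x ∉ pvAllowedA := by
      simp only [List.any_eq_true, Bool.not_eq_eq_eq_not, Bool.not_true] at hbad
      obtain ⟨c, hc, hc2⟩ := hbad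
      exact ⟨c, hc, by simpa using hc2⟩
    have hall2 : ¬ ∀ x ∈ number.toList, x ∈ pvAllowedA := by
      obtain ⟨c, hc, hc2⟩ := hex
      exact fun h => hc2 (h c hc)
    simp [hex, hall2]
  · have hga : (number.toList.all fun c => pvAllowedA.contains c) = true := by
      simp only [List.all_eq_true]
      intro c hc
      by_contra hc2
      exact hbad (by simp only [List.any_eq_true]; exact ⟨c, hc, by simpa using fun hm => hc2 (by simp [hm])⟩)
    have hfilt : number.toList.filter PySem.Chars.isdigit
        = number.toList.filter (fun c => decide ('0' ≤ c ∧ c ≤ '9')) :=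
      List.filter_congr (fun c hc => by rw [(pv_char_facts c (hall c hc)).2])
    have hbad' : (number.toList.any fun c => !(pvAllowedA.contains c)) = false := by
      simpa using hbad
    have hdig : ∀ c ∈ number.toList.filter (fun c => decide ('0' ≤ c ∧ c ≤ '9')), '0' ≤ c ∧ c ≤ '9' := by
      intro c hc; simpa using List.of_mem_filter hc
    rw [hfilt]
    simp only [hbad', hga, Bool.false_eq_true, if_false, if_true, List.nil_append]
    generalize number.toList.filter (fun c => decide ('0' ≤ c ∧ c ≤ '9')) = ds at hdig ⊢
    by_cases h10 : ds.length = 10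
    · obtain ⟨e1, e2, e3, e4⟩ := pv_slices_eq ds h10
      have hloc : PySem.List.slice ds (some (-10)) none = ds := by simp [PySem.List.slice, h10]
      simp [h10, e1, e2, e3, e4, hloc, PySem.Chars.startswith, List.isPrefixOf]
    · by_cases h11 : ds.length = 11
      · rcases ds with _ | ⟨d, t⟩
        · simp at h11
        · have ht : t.length = 10 := by simpa using h11
          have hd : '0' ≤ d ∧ d ≤ '9' := hdig d (by simp)
          have hdp : d ≠ '+' := fun h => by rw [h] at hd; revert hd; decide
          obtain ⟨e1, e2, e3, e4⟩ := pv_slices_eq t ht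
          have hloc : PySem.List.slice (d::t) (some (-10)) none = t := by
            simp [PySem.List.slice, ht]
          have hdrop : PySem.List.slice (d::t) (some 1) none = t := by
            simp [PySem.List.slice]
          by_cases hd7 : d = '7'
          · subst hd7
            simp [ht, hdrop, e1, e2, e3, e4, hloc, PySem.Chars.startswith, List.isPrefixOf]
          · by_cases hd8 : d = '8'
            · subst hd8
              simp [ht, hd7, e1, e2, e3, e4, hloc, PySem.Chars.startswith, List.isPrefixOf]
            · have hd7' : ¬ ('7' : Char) = d := fun h => hd7 h.symm
              have hd8' : ¬ ('8' : Char) = d := fun h => hd8 h.symm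
              have hdp' : ¬ ('+' : Char) = d := fun h => hdp h.symm
              have hsw7 : PySem.Chars.startswith (d::t) ['7'] = false := by
                simp [PySem.Chars.startswith, List.isPrefixOf, hd7']
              have hswp : PySem.Chars.startswith (d::t) ['+','7'] = false := by
                simp [PySem.Chars.startswith, List.isPrefixOf, hdp']
              have hsw8 : PySem.Chars.startswith (d::t) ['8'] = false := by
                simp [PySem.Chars.startswith, List.isPrefixOf, hd8']
              simp [ht, hsw7, hswp, hsw8, hd7, hd8]
      · simp [h10, h11]
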